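-- pv_equiv track=rewrite | github.com/hienpham15/Codeforces_competitions | Codeforces_edu_round110/B.py | split_even_odd
-- ===== SOURCE A (Python) =====
-- def split_even_odd(array):
--     even = []
--     odd = []
--
--     for i in array:
--         if (i%2 == 0):
--             even.append(i)
--         else:
--             odd.append(i)
--
--     even = sorted(even, reverse=True)
--     odd = sorted(odd, reverse=True)
--     return even+odd
-- ===== SOURCE B (Python) =====
-- def split_even_odd(array):
--     return sorted(array, key=lambda i: (i % 2, -i))
-- ===== Notes on version B (the rewrite author's own statement) =====
-- stated objective: idiomatic
-- what changed: Replaces the partition-into-two-lists plus two reverse sorts and a concatenation with a single stable sort on the composite key (i % 2, -i).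
import Mathlib
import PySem

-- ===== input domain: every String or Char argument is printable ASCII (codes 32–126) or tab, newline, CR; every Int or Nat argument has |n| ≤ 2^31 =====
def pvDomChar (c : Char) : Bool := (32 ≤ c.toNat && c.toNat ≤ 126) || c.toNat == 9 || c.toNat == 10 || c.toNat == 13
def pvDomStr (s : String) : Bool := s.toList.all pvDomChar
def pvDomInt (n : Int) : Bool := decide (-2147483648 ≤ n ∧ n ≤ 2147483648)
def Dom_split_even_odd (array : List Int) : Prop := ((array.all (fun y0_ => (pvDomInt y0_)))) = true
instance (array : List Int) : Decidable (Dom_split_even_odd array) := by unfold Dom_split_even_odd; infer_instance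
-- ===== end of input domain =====

-- B replaces A's partition-into-two-lists plus two reverse sorts with a single stable
-- sort on the composite key (i % 2, -i) (objective: idiomatic).

-- ===== PORT A =====
def split_even_odd (array : List Int) : List Int :=
  -- even = [], odd = []; for i in array: append i to even/odd by parity
  let p := array.foldl
    (fun (s : List Int × List Int) i =>
      if PySem.Int.mod i 2 = 0 then (s.1 ++ [i], s.2) else (s.1, s.2 ++ [i]))
    ([], [])
  -- even = sorted(even, reverse=True); odd = sorted(odd, reverse=True); return even+odd
  PySem.List.sorted p.1 (fun x => x) true ++ PySem.List.sorted p.2 (fun x => x) true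

-- ===== PORT B =====
def split_even_odd_alt (array : List Int) : List Int :=
  -- sorted(array, key=lambda i: (i % 2, -i))
  PySem.List.sorted2 array (fun i => PySem.Int.mod i 2) (fun i => -i) false

-- ===== PRECONDITION & SPEC =====
def Spec_split_even_odd (array : List Int) (out : List Int) : Prop := out = split_even_odd_alt array
instance (array : List Int) (out : List Int) : Decidable (Spec_split_even_odd array out) := by unfold Spec_split_even_odd; infer_instance

-- ===== CLAIM (what is proved, stated in full; the proofs are below) =====
def Claim_equal_split_even_odd : Prop := ∀ (array : List Int), Dom_split_even_odd array → Spec_split_even_odd array (split_even_odd array)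

-- ===== LEMMAS AND PROOFS =====

-- the comparison sorted2's insertion sort uses for the key (i % 2, -i)
def pvLt (a b : Int) : Bool :=
  decide (PySem.Int.mod a 2 < PySem.Int.mod b 2) ||
    (!decide (PySem.Int.mod b 2 < PySem.Int.mod a 2) && decide (-a < -b))

-- the comparison sorted(·, reverse=True)'s insertion sort uses (key = identity)
def pvGt (a b : Int) : Bool := decide (b < a)

def pvEven (i : Int) : Bool := decide (PySem.Int.mod i 2 = 0)

lemma insertBy_congr {α : Type} (f g : α → α → Bool) (x : α) (ys : List α)
    (h : ∀ y ∈ ys, f x y = g x y) :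
    PySem.List.insertBy f x ys = PySem.List.insertBy g x ys := by
  induction ys with
  | nil => rfl
  | cons y ys ih =>
    simp only [PySem.List.insertBy, h y (by simp)]
    split
    · rfl
    · rw [ih (fun z hz => h z (by simp [hz]))]

lemma insertBy_append_of_all_before {α : Type} (before : α → α → Bool) (x : α)
    (as bs : List α) (h : ∀ y ∈ bs, before x y = true) :
    PySem.List.insertBy before x (as ++ bs) = PySem.List.insertBy before x as ++ bs := by
  induction as with
  | nil =>
    cases bs with
    | nil => rfl
    | cons b bs => simp [PySem.List.insertBy, h b (by simp)]
  | cons a as ih =>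
    simp only [List.cons_append, PySem.List.insertBy]
    split
    · rfl
    · rw [ih]; rfl

lemma insertBy_append_of_all_not_before {α : Type} (before : α → α → Bool) (x : α)
    (as bs : List α) (h : ∀ y ∈ as, before x y = false) :
    PySem.List.insertBy before x (as ++ bs) = as ++ PySem.List.insertBy before x bs := by
  induction as with
  | nil => rfl
  | cons a as ih =>
    simp only [List.cons_append, PySem.List.insertBy, h a (by simp)]
    simp only [Bool.false_eq_true, if_false, List.cons.injEq, true_and]
    exact ih (fun z hz => h z (by simp [hz]))

-- A's accumulation loop builds exactly the two parity filters
lemma pvPairLoop (xs : List Int) (e o : List Int) :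
    xs.foldl
      (fun (s : List Int × List Int) i =>
        if PySem.Int.mod i 2 = 0 then (s.1 ++ [i], s.2) else (s.1, s.2 ++ [i]))
      (e, o)
    = (e ++ xs.filter pvEven, o ++ xs.filter (fun i => !pvEven i)) := by
  induction xs generalizing e o with
  | nil => simp
  | cons x xs ih =>
    by_cases hx : PySem.Int.mod x 2 = 0
    · have he : pvEven x = true := by rw [pvEven, decide_eq_true_eq]; exact hx
      rw [List.foldl_cons, if_pos hx, ih, List.filter_cons, List.filter_cons, he]
      simp [List.append_assoc]
    · have he : pvEven x = false := by rw [pvEven, decide_eq_false_iff_not]; exact hx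
      rw [List.foldl_cons, if_neg hx, ih, List.filter_cons, List.filter_cons, he]
      simp [List.append_assoc]

lemma mod_two_eq_one_of_not_even (i : Int) (h : pvEven i = false) :
    PySem.Int.mod i 2 = 1 := by
  rcases PySem.Int.mod_two_eq i with h0 | h1
  · rw [pvEven, decide_eq_false_iff_not] at h; exact absurd h0 h
  · exact h1

-- appending one element to the snoc form of an insertion sort
lemma sorted_rev_snoc (xs : List Int) (x : Int) :
    PySem.List.sorted (xs ++ [x]) (fun y => y) true
      = PySem.List.insertBy pvGt x (PySem.List.sorted xs (fun y => y) true) := by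
  rw [PySem.List.sorted_rev_eq_foldl_insertBy, PySem.List.sorted_rev_eq_foldl_insertBy,
    List.foldl_append]
  rfl

lemma sorted2_snoc (xs : List Int) (x : Int) :
    PySem.List.sorted2 (xs ++ [x]) (fun i => PySem.Int.mod i 2) (fun i => -i) false
      = PySem.List.insertBy pvLt x
          (PySem.List.sorted2 xs (fun i => PySem.Int.mod i 2) (fun i => -i) false) := by
  simp only [PySem.List.sorted2, List.foldl_append]
  rfl

-- on two elements of equal (i % 2), sorted2's comparison is plain descending order
lemma pvLt_eq_pvGt_of_same_mod (x y : Int) (h : PySem.Int.mod x 2 = PySem.Int.mod y 2) :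
    pvLt x y = pvGt x y := by
  simp only [pvLt, pvGt, h, lt_self_iff_false, decide_false, Bool.false_or, Bool.not_false,
    Bool.true_and]
  exact decide_eq_decide.mpr (by omega)

-- core equivalence: the composite-key sort is evens descending then odds descending
lemma pvMain (xs : List Int) :
    PySem.List.sorted2 xs (fun i => PySem.Int.mod i 2) (fun i => -i) false
      = PySem.List.sorted (xs.filter pvEven) (fun y => y) true
        ++ PySem.List.sorted (xs.filter (fun i => !pvEven i)) (fun y => y) true := by
  induction xs using List.reverseRecOn with
  | nil => rfl
  | append_singleton xs x ih =>
    rw [sorted2_snoc, ih, List.filter_append, List.filter_append]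
    by_cases hx : pvEven x = true
    · have hx0 : PySem.Int.mod x 2 = 0 := by simpa [pvEven] using hx
      rw [insertBy_append_of_all_before]
      · rw [insertBy_congr pvLt pvGt x _ (fun y hy => by
          refine pvLt_eq_pvGt_of_same_mod x y ?_
          have hye : pvEven y = true :=
            (List.mem_filter.mp ((PySem.List.mem_sorted _ _ _ _).mp hy)).2
          have hy0 : PySem.Int.mod y 2 = 0 := by simpa [pvEven] using hye
          rw [hx0, hy0])]
        rw [← sorted_rev_snoc]
        simp [hx]
      · intro y hy
        have := (List.mem_filter.mp ((PySem.List.mem_sorted _ _ _ _).mp hy))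
        have hy1 : PySem.Int.mod y 2 = 1 :=
          mod_two_eq_one_of_not_even y (by simpa using this.2)
        rw [pvLt, hx0, hy1]; simp
    · have hx1 : PySem.Int.mod x 2 = 1 :=
        mod_two_eq_one_of_not_even x (by simpa using hx)
      rw [insertBy_append_of_all_not_before]
      · rw [insertBy_congr pvLt pvGt x _ (fun y hy => by
          refine pvLt_eq_pvGt_of_same_mod x y ?_
          have := (List.mem_filter.mp ((PySem.List.mem_sorted _ _ _ _).mp hy))
          have hy1 : PySem.Int.mod y 2 = 1 :=
            mod_two_eq_one_of_not_even y (by simpa using this.2)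
          rw [hx1, hy1])]
        rw [← sorted_rev_snoc]
        simp [hx]
      · intro y hy
        have := (List.mem_filter.mp ((PySem.List.mem_sorted _ _ _ _).mp hy))
        have hy0 : PySem.Int.mod y 2 = 0 := by simpa [pvEven] using this.2
        rw [pvLt, hx1, hy0]; simp

-- ===== VERDICT (by name: the statement is the Claim_ definition above) =====
theorem split_even_odd_spec : Claim_equal_split_even_odd := by
  intro array _
  unfold Spec_split_even_odd split_even_odd split_even_odd_alt
  rw [pvPairLoop array [] []]
  simp only [List.nil_append]
  exact (pvMain array).symm
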